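-- pv_equiv track=rewrite | github.com/AJ-Devlopers/CareerForge-AI | app/modules/module1_genai/pipeline.py | clean_skills
-- ===== SOURCE A (Python) =====
-- def clean_skills(skills: list) -> list:
--     cleaned = []
--     seen    = set()
--
--     for s in skills:
--         s = s.strip()
--         key = s.lower()
--
--         if (
--             2 < len(s) < 30
--             and not s.isdigit()
--             and key not in seen
--         ):
--             cleaned.append(s.title())
--             seen.add(key)
--
--     return sorted(cleaned)
-- ===== SOURCE B (Python) =====
-- from itertools import groupby
--
--
-- def clean_skills(skills: list) -> list:
--     titled = [t.title()
--               for t in (s.strip() for s in skills)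
--               if 2 < len(t) < 30 and not t.isdigit()]
--     return [k for k, _ in groupby(sorted(titled))]
-- ===== Notes on version B (the rewrite author's own statement) =====
-- stated objective: alternative
-- what changed: Replaces the running 'seen' set of lowercase keys with a collect-all comprehension followed by sort and adjacent-duplicate collapse (itertools.groupby), relying on the fact that for ASCII two strings have equal title() exactly when their lower() keys are equal.
import Mathlib
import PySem

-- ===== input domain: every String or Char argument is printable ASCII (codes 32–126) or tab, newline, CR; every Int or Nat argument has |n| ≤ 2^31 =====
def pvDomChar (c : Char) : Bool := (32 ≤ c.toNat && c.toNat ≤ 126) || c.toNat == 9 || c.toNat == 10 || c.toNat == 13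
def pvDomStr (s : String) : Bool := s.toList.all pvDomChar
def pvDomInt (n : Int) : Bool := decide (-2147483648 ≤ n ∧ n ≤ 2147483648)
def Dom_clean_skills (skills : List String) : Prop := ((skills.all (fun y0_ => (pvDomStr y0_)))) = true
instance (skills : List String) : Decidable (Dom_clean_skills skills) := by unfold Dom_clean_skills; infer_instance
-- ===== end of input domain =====

-- B replaces A's running 'seen' set of lowercase keys by collecting every valid titled string,
-- sorting, and collapsing adjacent duplicates (itertools.groupby); same cost, different structure.

-- ===== PORT A =====

-- shared helper: Python str.title() (exact on ASCII: a letter is uppercased after a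
-- non-letter and lowercased after a letter; other characters pass through unchanged)
def titleChars (prev : Bool) : List Char → List Char
  | [] => []
  | c :: cs =>
      (if prev then PySem.Chars.lowerChar c else PySem.Chars.upperChar c)
        :: titleChars (PySem.Chars.isalpha c) cs

def strTitle (s : String) : String := String.ofList (titleChars false s.toList)

def cleanStep (acc : List String × PySem.Set String) (s0 : String) :
    List String × PySem.Set String :=
  let s := PySem.Str.strip s0
  let key := PySem.Str.lower s
  if 2 < PySem.Str.len s ∧ PySem.Str.len s < 30 ∧ PySem.Str.strIsdigit s = false ∧
      PySem.Set.contains acc.2 key = false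
  then (acc.1 ++ [strTitle s], PySem.Set.add acc.2 key)
  else acc

def clean_skills (skills : List String) : List String :=
  PySem.List.sorted (skills.foldl cleanStep ([], PySem.Set.empty)).1 (fun x => x) false

-- ===== PORT B =====

def validStr (t : String) : Bool :=
  decide (2 < PySem.Str.len t) && decide (PySem.Str.len t < 30) && !PySem.Str.strIsdigit t

-- [k for k, _ in groupby(sorted_list)] : collapse runs of equal adjacent elements
def dedupAdj : List String → List String
  | [] => []
  | [x] => [x]
  | x :: y :: rest => if x = y then dedupAdj (y :: rest) else x :: dedupAdj (y :: rest)

def clean_skills_alt (skills : List String) : List String :=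
  dedupAdj (PySem.List.sorted
    (((skills.map PySem.Str.strip).filter validStr).map strTitle) (fun x => x) false)

-- ===== PRECONDITION & SPEC =====
def Spec_clean_skills (skills : List String) (out : List String) : Prop := out = clean_skills_alt skills
instance (skills : List String) (out : List String) : Decidable (Spec_clean_skills skills out) := by unfold Spec_clean_skills; infer_instance

-- ===== CLAIM (what is proved, stated in full; the proofs are below) =====
def Claim_equal_clean_skills : Prop := ∀ (skills : List String), Dom_clean_skills skills → Spec_clean_skills skills (clean_skills skills)

-- ===== LEMMAS AND PROOFS =====

-- ---- character-level facts about lower/upper/title (hold for every Char) ----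

theorem char_le_iff (a b : Char) : a ≤ b ↔ a.toNat ≤ b.toNat := Iff.rfl

theorem toNat_ofNat_of_lt (n : Nat) (h : n < 0xd800) : (Char.ofNat n).toNat = n := by
  unfold Char.ofNat
  split
  · rfl
  · next hv => exfalso; simp [Nat.isValidChar] at hv; omega

theorem isupper_iff (c : Char) : PySem.Chars.isupper c = true ↔ 65 ≤ c.toNat ∧ c.toNat ≤ 90 := by
  show (decide ('A' ≤ c) && decide (c ≤ 'Z')) = true ↔ _
  rw [Bool.and_eq_true, decide_eq_true_iff, decide_eq_true_iff, char_le_iff, char_le_iff]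
  exact Iff.rfl

theorem islower_iff (c : Char) : PySem.Chars.islower c = true ↔ 97 ≤ c.toNat ∧ c.toNat ≤ 122 := by
  show (decide ('a' ≤ c) && decide (c ≤ 'z')) = true ↔ _
  rw [Bool.and_eq_true, decide_eq_true_iff, decide_eq_true_iff, char_le_iff, char_le_iff]
  exact Iff.rfl

theorem isupper_false_of_bounds (c : Char) (h : ¬ (65 ≤ c.toNat ∧ c.toNat ≤ 90)) :
    PySem.Chars.isupper c = false := by
  cases hh : PySem.Chars.isupper c
  · rfl
  · exact absurd ((isupper_iff c).mp hh) h

theorem islower_false_of_bounds (c : Char) (h : ¬ (97 ≤ c.toNat ∧ c.toNat ≤ 122)) :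
    PySem.Chars.islower c = false := by
  cases hh : PySem.Chars.islower c
  · rfl
  · exact absurd ((islower_iff c).mp hh) h

theorem lowerChar_of_upper (c : Char) (h : PySem.Chars.isupper c = true) :
    PySem.Chars.lowerChar c = Char.ofNat (c.toNat + 32) := by
  simp [PySem.Chars.lowerChar, h]

theorem lowerChar_of_not_upper (c : Char) (h : PySem.Chars.isupper c = false) :
    PySem.Chars.lowerChar c = c := by
  simp [PySem.Chars.lowerChar, h]

theorem upperChar_of_lower (c : Char) (h : PySem.Chars.islower c = true) :
    PySem.Chars.upperChar c = Char.ofNat (c.toNat - 32) := by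
  simp [PySem.Chars.upperChar, h]

theorem upperChar_of_not_lower (c : Char) (h : PySem.Chars.islower c = false) :
    PySem.Chars.upperChar c = c := by
  simp [PySem.Chars.upperChar, h]

theorem lowerChar_lowerChar (c : Char) :
    PySem.Chars.lowerChar (PySem.Chars.lowerChar c) = PySem.Chars.lowerChar c := by
  cases hu : PySem.Chars.isupper c
  · rw [lowerChar_of_not_upper c hu]
    exact lowerChar_of_not_upper c hu
  · have hb := (isupper_iff c).mp hu
    rw [lowerChar_of_upper c hu]
    have ht : (Char.ofNat (c.toNat + 32)).toNat = c.toNat + 32 := toNat_ofNat_of_lt _ (by omega)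
    exact lowerChar_of_not_upper _ (isupper_false_of_bounds _ (by rw [ht]; omega))

theorem upperChar_lowerChar (c : Char) :
    PySem.Chars.upperChar (PySem.Chars.lowerChar c) = PySem.Chars.upperChar c := by
  cases hu : PySem.Chars.isupper c
  · rw [lowerChar_of_not_upper c hu]
  · have hb := (isupper_iff c).mp hu
    rw [lowerChar_of_upper c hu]
    have ht : (Char.ofNat (c.toNat + 32)).toNat = c.toNat + 32 := toNat_ofNat_of_lt _ (by omega)
    rw [upperChar_of_lower _ ((islower_iff _).mpr (by rw [ht]; omega)),
        upperChar_of_not_lower c (islower_false_of_bounds _ (by omega)), ht]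
    have : c.toNat + 32 - 32 = c.toNat := by omega
    rw [this, Char.ofNat_toNat]

theorem lowerChar_upperChar (c : Char) :
    PySem.Chars.lowerChar (PySem.Chars.upperChar c) = PySem.Chars.lowerChar c := by
  cases hl : PySem.Chars.islower c
  · rw [upperChar_of_not_lower c hl]
  · have hb := (islower_iff c).mp hl
    rw [upperChar_of_lower c hl]
    have ht : (Char.ofNat (c.toNat - 32)).toNat = c.toNat - 32 := toNat_ofNat_of_lt _ (by omega)
    rw [lowerChar_of_upper _ ((isupper_iff _).mpr (by rw [ht]; omega)),
        lowerChar_of_not_upper c (isupper_false_of_bounds _ (by omega)), ht]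
    have : c.toNat - 32 + 32 = c.toNat := by omega
    rw [this, Char.ofNat_toNat]

theorem isalpha_lowerChar (c : Char) :
    PySem.Chars.isalpha (PySem.Chars.lowerChar c) = PySem.Chars.isalpha c := by
  cases hu : PySem.Chars.isupper c
  · rw [lowerChar_of_not_upper c hu]
  · have hb := (isupper_iff c).mp hu
    rw [lowerChar_of_upper c hu]
    have ht : (Char.ofNat (c.toNat + 32)).toNat = c.toNat + 32 := toNat_ofNat_of_lt _ (by omega)
    simp [PySem.Chars.isalpha, hu, (islower_iff _).mpr (by rw [ht]; omega)]

-- ---- title factors through lower ----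

theorem titleChars_map_lowerChar (cs : List Char) : ∀ prev,
    titleChars prev (cs.map PySem.Chars.lowerChar) = titleChars prev cs := by
  induction cs with
  | nil => intro prev; rfl
  | cons c cs ih =>
      intro prev
      simp [titleChars, lowerChar_lowerChar, upperChar_lowerChar, isalpha_lowerChar, ih]

theorem map_lowerChar_titleChars (cs : List Char) : ∀ prev,
    (titleChars prev cs).map PySem.Chars.lowerChar = cs.map PySem.Chars.lowerChar := by
  induction cs with
  | nil => intro prev; rfl
  | cons c cs ih =>
      intro prev
      cases prev <;> simp [titleChars, lowerChar_lowerChar, lowerChar_upperChar, ih]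

theorem strTitle_eq_of_lower_eq (s t : String)
    (h : PySem.Str.lower s = PySem.Str.lower t) : strTitle s = strTitle t := by
  have h' : s.toList.map PySem.Chars.lowerChar = t.toList.map PySem.Chars.lowerChar := by
    have := congrArg String.toList h
    simpa [PySem.Str.lower, PySem.Chars.lower, String.toList_ofList] using this
  unfold strTitle
  rw [← titleChars_map_lowerChar s.toList false, ← titleChars_map_lowerChar t.toList false, h']

theorem lower_strTitle (s : String) : PySem.Str.lower (strTitle s) = PySem.Str.lower s := by
  unfold strTitle PySem.Str.lower
  rw [String.toList_ofList]
  unfold PySem.Chars.lower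
  rw [map_lowerChar_titleChars]

-- ---- the valid-skill condition ----

abbrev validP (t : String) : Prop :=
  2 < PySem.Str.len t ∧ PySem.Str.len t < 30 ∧ PySem.Str.strIsdigit t = false

theorem validStr_iff (t : String) : validStr t = true ↔ validP t := by
  unfold validStr validP
  cases h : PySem.Str.strIsdigit t <;> simp_all

-- ---- A's loop, rephrased as a structural recursion ----

def goA (seen : PySem.Set String) : List String → List String
  | [] => []
  | s0 :: rest =>
      if validP (PySem.Str.strip s0) ∧
          PySem.Set.contains seen (PySem.Str.lower (PySem.Str.strip s0)) = false
      then strTitle (PySem.Str.strip s0) ::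
             goA (PySem.Set.add seen (PySem.Str.lower (PySem.Str.strip s0))) rest
      else goA seen rest

theorem foldl_cleanStep_eq_goA (skills : List String) : ∀ (c : List String) (seen : PySem.Set String),
    (skills.foldl cleanStep (c, seen)).1 = c ++ goA seen skills := by
  induction skills with
  | nil => intro c seen; simp [goA]
  | cons s0 rest ih =>
      intro c seen
      rw [List.foldl_cons]
      simp only [cleanStep, goA]
      by_cases h : validP (PySem.Str.strip s0) ∧
          PySem.Set.contains seen (PySem.Str.lower (PySem.Str.strip s0)) = false
      · obtain ⟨⟨h1, h2, h3⟩, h4⟩ := h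
        rw [if_pos (⟨h1, h2, h3, h4⟩ : _ ∧ _ ∧ _ ∧ _), if_pos ⟨⟨h1, h2, h3⟩, h4⟩, ih]
        simp
      · rw [if_neg (fun ⟨h1, h2, h3, h4⟩ => h ⟨⟨h1, h2, h3⟩, h4⟩), if_neg h]
        exact ih c seen

theorem mem_goA (skills : List String) : ∀ (seen : PySem.Set String) (x : String),
    x ∈ goA seen skills ↔
      ∃ s0 ∈ skills, validP (PySem.Str.strip s0) ∧ strTitle (PySem.Str.strip s0) = x ∧
        PySem.Str.lower (PySem.Str.strip s0) ∉ seen := by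
  induction skills with
  | nil => intro seen x; simp [goA]
  | cons s0 rest ih =>
      intro seen x
      unfold goA
      by_cases h : validP (PySem.Str.strip s0) ∧
          PySem.Set.contains seen (PySem.Str.lower (PySem.Str.strip s0)) = false
      · obtain ⟨hv, hc⟩ := h
        have hns : PySem.Str.lower (PySem.Str.strip s0) ∉ seen := by
          intro hmem
          rw [(PySem.Set.contains_iff seen _).mpr hmem] at hc
          exact Bool.true_eq_false.mp hc
        rw [if_pos ⟨hv, hc⟩]
        simp only [List.mem_cons, ih]
        constructor
        · rintro (rfl | ⟨w, hw, hwv, hwt, hwn⟩)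
          · exact ⟨s0, Or.inl rfl, hv, rfl, hns⟩
          · refine ⟨w, Or.inr hw, hwv, hwt, fun hm => hwn ?_⟩
            exact (PySem.Set.mem_add seen _ _).mpr (Or.inl hm)
        · rintro ⟨w, hw | hw, hwv, hwt, hwn⟩
          · subst hw; exact Or.inl hwt.symm
          · by_cases hk : PySem.Str.lower (PySem.Str.strip w) =
                PySem.Str.lower (PySem.Str.strip s0)
            · left
              rw [← hwt]
              exact strTitle_eq_of_lower_eq _ _ hk
            · right
              refine ⟨w, hw, hwv, hwt, fun hm => ?_⟩
              rcases (PySem.Set.mem_add seen _ _).mp hm with hm | hm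
              · exact hwn hm
              · exact hk hm
      · rw [if_neg h]
        rw [ih]
        simp only [List.mem_cons]
        constructor
        · rintro ⟨w, hw, hwv, hwt, hwn⟩; exact ⟨w, Or.inr hw, hwv, hwt, hwn⟩
        · rintro ⟨w, hw | hw, hwv, hwt, hwn⟩
          · subst hw
            exfalso
            apply h
            refine ⟨hwv, ?_⟩
            cases hc : PySem.Set.contains seen (PySem.Str.lower (PySem.Str.strip w))
            · rfl
            · exact absurd ((PySem.Set.contains_iff _ _).mp hc) hwn
          · exact ⟨w, hw, hwv, hwt, hwn⟩

theorem lower_not_mem_of_mem_goA (skills : List String) (seen : PySem.Set String) (x : String)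
    (hx : x ∈ goA seen skills) : PySem.Str.lower x ∉ seen := by
  rcases (mem_goA skills seen x).mp hx with ⟨w, _, _, hwt, hwn⟩
  rw [← hwt, lower_strTitle]
  exact hwn

theorem nodup_goA (skills : List String) : ∀ (seen : PySem.Set String),
    (goA seen skills).Nodup := by
  induction skills with
  | nil => intro seen; simp [goA]
  | cons s0 rest ih =>
      intro seen
      unfold goA
      split
      · next h =>
        refine List.Nodup.cons (fun hm => ?_) (ih _)
        have := lower_not_mem_of_mem_goA rest _ _ hm
        rw [lower_strTitle] at this
        exact this ((PySem.Set.mem_add seen _ _).mpr (Or.inr rfl))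
      · exact ih seen

-- ---- B's adjacent dedup ----

theorem mem_dedupAdj (l : List String) (x : String) : x ∈ dedupAdj l ↔ x ∈ l := by
  induction l with
  | nil => simp [dedupAdj]
  | cons a t ih =>
      cases t with
      | nil => simp [dedupAdj]
      | cons b t2 =>
          unfold dedupAdj
          split_ifs with h
          · subst h; rw [ih]; simp
          · simp only [List.mem_cons] at ih ⊢
            rw [ih]

theorem pairwise_lt_dedupAdj (l : List String) (h : l.Pairwise (· ≤ ·)) :
    (dedupAdj l).Pairwise (· < ·) := by
  induction l with
  | nil => simp [dedupAdj]
  | cons a t ih =>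
      cases t with
      | nil => simp [dedupAdj]
      | cons b t2 =>
          rcases List.pairwise_cons.mp h with ⟨hale, htail⟩
          rcases List.pairwise_cons.mp htail with ⟨hble, _⟩
          unfold dedupAdj
          split_ifs with hab
          · exact ih htail
          · refine List.pairwise_cons.mpr ⟨fun y hy => ?_, ih htail⟩
            rcases List.mem_cons.mp ((mem_dedupAdj _ _).mp hy) with rfl | hy2
            · exact lt_of_le_of_ne (hale _ (List.mem_cons_self)) hab
            · refine lt_of_le_of_ne (hale _ (List.mem_cons_of_mem _ hy2)) (fun hay => ?_)
              exact hab (le_antisymm (hale _ List.mem_cons_self) (hay ▸ hble _ hy2))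

theorem nodup_dedupAdj_of_sorted (l : List String) (h : l.Pairwise (· ≤ ·)) :
    (dedupAdj l).Nodup :=
  (pairwise_lt_dedupAdj l h).imp ne_of_lt

-- ---- assembly ----

theorem mem_titled (skills : List String) (x : String) :
    x ∈ ((skills.map PySem.Str.strip).filter validStr).map strTitle ↔
      ∃ s0 ∈ skills, validP (PySem.Str.strip s0) ∧ strTitle (PySem.Str.strip s0) = x := by
  simp only [List.mem_map, List.mem_filter, validStr_iff]
  constructor
  · rintro ⟨t, ⟨⟨w, hw, rfl⟩, hv⟩, rfl⟩; exact ⟨w, hw, hv, rfl⟩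
  · rintro ⟨w, hw, hv, rfl⟩; exact ⟨_, ⟨⟨w, hw, rfl⟩, hv⟩, rfl⟩

theorem clean_skills_eq_alt (skills : List String) :
    clean_skills skills = clean_skills_alt skills := by
  unfold clean_skills clean_skills_alt
  rw [foldl_cleanStep_eq_goA skills [] PySem.Set.empty, List.nil_append]
  set T := ((skills.map PySem.Str.strip).filter validStr).map strTitle with hT
  have hsortedT : (PySem.List.sorted T (fun x => x) false).Pairwise (· ≤ ·) :=
    PySem.List.sorted_pairwise T (fun x => x)
  have hperm : (dedupAdj (PySem.List.sorted T (fun x => x) false)).Perm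
      (goA PySem.Set.empty skills) := by
    rw [List.perm_ext_iff_of_nodup (nodup_dedupAdj_of_sorted _ hsortedT) (nodup_goA skills _)]
    intro x
    rw [mem_dedupAdj, PySem.List.mem_sorted, hT, mem_titled, mem_goA]
    constructor
    · rintro ⟨w, hw, hv, ht⟩
      exact ⟨w, hw, hv, ht, by simp [PySem.Set.empty]⟩
    · rintro ⟨w, hw, hv, ht, _⟩; exact ⟨w, hw, hv, ht⟩
  exact PySem.List.sorted_eq_of_perm_of_pairwise_lt _ _ _ hperm
    (pairwise_lt_dedupAdj _ hsortedT)

-- ===== VERDICT (by name: the statement is the Claim_ definition above) =====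
theorem clean_skills_spec : Claim_equal_clean_skills := by
  intro skills _
  unfold Spec_clean_skills
  exact clean_skills_eq_alt skills
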